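-- pv_equiv track=rewrite | github.com/humancipher/Programming_Contest | Programming_Contest/AtCoder/other/tokiomarine2020/tokiomarine2020_C.py | solve
-- ===== SOURCE A (Python) =====
-- def solve(A,N,K):
--     for k in range(K):
--         C = [0 for _ in range(N+1)]
--         #C[i]:i番目の電球を照らす電球の数
--         for i in range(N):
--             C[max(i-A[i],0)] += 1
--             C[min(i+A[i]+1,N)] -= 1
--         for i in range(1,N):
--             C[i] += C[i-1]
--
--         if C[0] == N or C[N-1] == N:
--             for i in range(N):
--                 A[i] = N
--             break
--         else:
--             for i in range(N):
--                 A[i] = C[i]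
--     return A
-- ===== SOURCE B (Python) =====
-- def solve(A, N, K):
--     for _ in range(K):
--         C = [sum(1 for j in range(N) if abs(i - j) <= A[j]) for i in range(N)]
--         if N == 0 or C[0] == N or C[N - 1] == N:
--             for i in range(N):
--                 A[i] = N
--             break
--         for i in range(N):
--             A[i] = C[i]
--     return A
-- ===== Notes on version B (the rewrite author's own statement) =====
-- stated objective: simpler
-- what changed: Replaces the difference-array-plus-prefix-sum construction of C with a direct nested count (C[i] = number of bulbs j with abs(i-j) <= A[j]) built as a fresh list each step, keeping the same saturation check; the two constructions agree exactly for nonnegative ranges, which Pre_ guarantees.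
-- outside the precondition, e.g. on solve([-1], 1, 1): A returns [-1], B returns [0]
import Mathlib
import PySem

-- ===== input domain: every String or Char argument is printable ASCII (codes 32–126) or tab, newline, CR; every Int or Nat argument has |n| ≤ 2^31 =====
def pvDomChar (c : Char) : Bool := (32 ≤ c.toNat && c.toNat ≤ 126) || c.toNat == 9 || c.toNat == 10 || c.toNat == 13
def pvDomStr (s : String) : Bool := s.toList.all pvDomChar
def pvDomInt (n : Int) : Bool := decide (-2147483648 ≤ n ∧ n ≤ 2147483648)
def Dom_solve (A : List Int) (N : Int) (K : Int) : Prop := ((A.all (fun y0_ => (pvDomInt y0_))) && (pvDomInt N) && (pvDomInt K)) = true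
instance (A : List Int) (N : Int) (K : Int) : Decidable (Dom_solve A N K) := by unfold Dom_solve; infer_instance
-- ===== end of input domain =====

-- B rebuilds C by a direct nested count (simpler) instead of A's difference array + prefix sums.
-- Both Pythons mutate A in place identically; the theorems below are about the returned list.

-- ===== PORT A =====
-- body of A's 'for i in range(N)' difference-array loop
def stepABody (A : List Int) (N : Int) (C : List Int) (i : Int) : List Int :=
  let ai := PySem.List.pyGetD A i 0
  let C' := PySem.List.pySetD C (max (i - ai) 0) (PySem.List.pyGetD C (max (i - ai) 0) 0 + 1)
  PySem.List.pySetD C' (min (i + ai + 1) N) (PySem.List.pyGetD C' (min (i + ai + 1) N) 0 - 1)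

-- body of A's 'for i in range(1,N)' prefix-sum loop
def stepAPrefix (C : List Int) (i : Int) : List Int :=
  PySem.List.pySetD C i (PySem.List.pyGetD C i 0 + PySem.List.pyGetD C (i-1) 0)

-- body of A's 'for k in range(K)' loop: returns (new A, broke?)
def solveStepA (N : Int) (A : List Int) : List Int × Bool :=
  let C0 : List Int := (PySem.List.pyRange 0 (N+1) 1).map (fun _ => 0)
  let C1 := (PySem.List.pyRange 0 N 1).foldl (stepABody A N) C0
  let C := (PySem.List.pyRange 1 N 1).foldl stepAPrefix C1
  if PySem.List.pyGetD C 0 0 = N ∨ PySem.List.pyGetD C (N-1) 0 = N then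
    ((PySem.List.pyRange 0 N 1).foldl (fun Aa i => PySem.List.pySetD Aa i N) A, true)
  else
    ((PySem.List.pyRange 0 N 1).foldl (fun Aa i => PySem.List.pySetD Aa i (PySem.List.pyGetD C i 0)) A, false)

def solve (A : List Int) (N : Int) (K : Int) : List Int :=
  ((PySem.List.pyRange 0 K 1).foldl
    (fun st _ => if st.2 then st else solveStepA N st.1) (A, false)).1

-- ===== PORT B =====
-- the generator expression 'sum(1 for j in range(N) if abs(i - j) <= A[j])'
def solveCntB (A : List Int) (N : Int) (i : Int) : Int :=
  (PySem.List.pyRange 0 N 1).foldl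
    (fun acc j => if |i - j| ≤ PySem.List.pyGetD A j 0 then acc + 1 else acc) 0

-- body of B's 'for _ in range(K)' loop: returns (new A, broke?)
def solveStepB (N : Int) (A : List Int) : List Int × Bool :=
  let C : List Int := (PySem.List.pyRange 0 N 1).map (fun i => solveCntB A N i)
  if N = 0 ∨ PySem.List.pyGetD C 0 0 = N ∨ PySem.List.pyGetD C (N-1) 0 = N then
    ((PySem.List.pyRange 0 N 1).foldl (fun Aa i => PySem.List.pySetD Aa i N) A, true)
  else
    ((PySem.List.pyRange 0 N 1).foldl (fun Aa i => PySem.List.pySetD Aa i (PySem.List.pyGetD C i 0)) A, false)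

def solve_alt (A : List Int) (N : Int) (K : Int) : List Int :=
  ((PySem.List.pyRange 0 K 1).foldl
    (fun st _ => if st.2 then st else solveStepB N st.1) (A, false)).1

-- ===== PRECONDITION & SPEC =====
-- Pre_ restricts to the task's natural domain when the loop runs (K ≥ 1): 0 ≤ N ≤ len(A) and
-- nonnegative radii A[0..N); outside it A raises IndexError, except for some negative radii on
-- which A's clamped difference array contributes spurious ±1s (malformed input, excluded).
def Pre_solve (A : List Int) (N : Int) (K : Int) : Prop :=
  K ≤ 0 ∨ (0 ≤ N ∧ N ≤ (A.length : Int) ∧ (A.take N.toNat).all (fun x => decide (0 ≤ x)) = true)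
instance (A : List Int) (N : Int) (K : Int) : Decidable (Pre_solve A N K) := by
  unfold Pre_solve; infer_instance

def pvWitness_solve : List Int × Int × Int := ([1, 0, 2], 3, 2)

def Spec_solve (A : List Int) (N : Int) (K : Int) (out : List Int) : Prop := out = solve_alt A N K
instance (A : List Int) (N : Int) (K : Int) (out : List Int) : Decidable (Spec_solve A N K out) := by unfold Spec_solve; infer_instance

-- ===== CLAIM (what is proved, stated in full; the proofs are below) =====
def Claim_equal_solve : Prop := ∀ (A : List Int) (N : Int) (K : Int), Dom_solve A N K → Pre_solve A N K → Spec_solve A N K (solve A N K)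

-- ===== LEMMAS AND PROOFS =====

theorem solve_witness_ok :
    Dom_solve pvWitness_solve.1 pvWitness_solve.2.1 pvWitness_solve.2.2 ∧
    Pre_solve pvWitness_solve.1 pvWitness_solve.2.1 pvWitness_solve.2.2 := by
  constructor <;> decide

-- ---- Nat-indexed model of the two loop bodies ----

def aR (A : List Int) (j : Nat) : Int := A.getD j 0
def loF (A : List Int) (j : Nat) : Int := max ((j : Int) - aR A j) 0
def hiF (A : List Int) (N : Int) (j : Nat) : Int := min ((j : Int) + aR A j + 1) N
def gF (A : List Int) (N : Int) (j p : Nat) : Int :=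
  (if loF A j = (p : Int) then 1 else 0) - (if hiF A N j = (p : Int) then 1 else 0)
def cntF (A : List Int) (n : Nat) (i : Nat) : Int :=
  ∑ j ∈ Finset.range n, if |(i : Int) - (j : Int)| ≤ aR A j then (1 : Int) else 0

def updD (A : List Int) (N : Int) (C : List Int) (k : Nat) : List Int :=
  let l := (loF A k).toNat
  let h := (hiF A N k).toNat
  let C1 := C.set l (C.getD l 0 + 1)
  C1.set h (C1.getD h 0 - 1)

def updP (C : List Int) (k : Nat) : List Int :=
  C.set (k+1) (C.getD (k+1) 0 + C.getD k 0)

def invA (A : List Int) (n : Nat) : Prop := n ≤ A.length ∧ ∀ j < n, 0 ≤ aR A j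

-- ---- generic helpers ----

theorem pvGetD_set (l : List Int) (i j : Nat) (v : Int) :
    (l.set i v).getD j 0 = if j = i ∧ i < l.length then v else l.getD j 0 := by
  rw [List.getD_eq_getElem?_getD, List.getD_eq_getElem?_getD, List.getElem?_set]
  split_ifs with h1 h2 h3 h3 <;> simp_all

theorem pvGetD_replicate (n p : Nat) : (List.replicate n (0:Int)).getD p 0 = 0 := by
  rw [List.getD_eq_getElem?_getD, List.getElem?_replicate]
  split_ifs <;> simp

theorem ind_sum (c : Int) (m : Nat) :
    (∑ p ∈ Finset.range m, if c = (p : Int) then (1 : Int) else 0)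
      = if 0 ≤ c ∧ c < (m : Int) then 1 else 0 := by
  induction m with
  | zero =>
    have h : ¬(0 ≤ c ∧ c < ((0:Nat) : Int)) := by omega
    simp only [Finset.range_zero, Finset.sum_empty, if_neg h]
  | succ m ih =>
    rw [Finset.sum_range_succ, ih]
    have hcast : ((m+1 : Nat) : Int) = (m : Int) + 1 := by push_cast; ring
    rw [hcast]
    split_ifs <;> omega

theorem foldl_if_count (p : Nat → Prop) [DecidablePred p] (m : Nat) : ∀ (c : Int),
    (List.range m).foldl (fun acc k => if p k then acc + 1 else acc) c
      = c + ∑ k ∈ Finset.range m, (if p k then (1 : Int) else 0) := by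
  induction m with
  | zero => intro c; simp
  | succ m ih =>
    intro c
    rw [List.range_succ, List.foldl_append, ih c]
    simp only [List.foldl_cons, List.foldl_nil, Finset.sum_range_succ]
    split_ifs <;> ring

-- fold over range(0, n) ported to a fold over List.range n
theorem pyfoldA {α : Type} (n : Nat) (f : α → Int → α) (g : α → Nat → α) (init : α)
    (h : ∀ C k, k < n → f C ((k : Nat) : Int) = g C k) :
    (PySem.List.pyRange 0 (n : Int) 1).foldl f init = (List.range n).foldl g init := by
  rw [PySem.List.pyRange_one]
  have h0 : (((n : Int) - 0)).toNat = n := by omega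
  rw [h0, List.foldl_map]
  apply PySem.List.foldl_congr_mem
  intro acc k hk
  have hz : (0 : Int) + (k : Int) = (k : Int) := by omega
  rw [hz, h _ _ (List.mem_range.mp hk)]

-- fold over range(1, n) ported to a fold over List.range (n-1)
theorem pyfoldP {α : Type} (n : Nat) (f : α → Int → α) (g : α → Nat → α) (init : α)
    (h : ∀ C k, k < n - 1 → f C (1 + (k : Nat) : Int) = g C k) :
    (PySem.List.pyRange 1 (n : Int) 1).foldl f init = (List.range (n-1)).foldl g init := by
  rw [PySem.List.pyRange_one]
  have h0 : (((n : Int) - 1)).toNat = n - 1 := by omega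
  rw [h0, List.foldl_map]
  apply PySem.List.foldl_congr_mem
  intro acc k hk
  rw [h _ _ (List.mem_range.mp hk)]

-- ---- bridges: the ported bodies equal the Nat-indexed model bodies ----

theorem bridge1 (A : List Int) (n : Nat) (hpos : ∀ j < n, 0 ≤ aR A j)
    (C : List Int) (k : Nat) (hk : k < n) :
    stepABody A (n : Int) C ((k : Nat) : Int) = updD A (n : Int) C k := by
  have ha : PySem.List.pyGetD A ((k : Nat) : Int) 0 = aR A k := by
    simp [PySem.List.pyGetD_natCast, aR]
  have hk' := hpos k hk
  simp only [stepABody, updD, ha]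
  have h1 : max ((k : Int) - aR A k) 0 = (((loF A k).toNat : Nat) : Int) := by
    unfold loF
    rw [Int.toNat_of_nonneg (le_max_right _ _)]
  have h2 : min ((k : Int) + aR A k + 1) (n : Int) = (((hiF A (n : Int) k).toNat : Nat) : Int) := by
    unfold hiF at *
    omega
  rw [h1, h2]
  simp only [PySem.List.pySetD_natCast, PySem.List.pyGetD_natCast, List.getD_eq_getElem?_getD]

theorem bridge2 (C : List Int) (k : Nat) :
    stepAPrefix C (1 + (k : Nat) : Int) = updP C k := by
  have h2 : (1 + (k : Int)) - 1 = ((k : Nat) : Int) := by ring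
  have h1 : (1 + (k : Int)) = (((k+1 : Nat)) : Int) := by push_cast; ring
  simp only [stepAPrefix, updP]
  rw [h2, h1]
  simp only [PySem.List.pySetD_natCast, PySem.List.pyGetD_natCast, List.getD_eq_getElem?_getD]

-- ---- phase 1: the difference array ----

theorem phase1 (A : List Int) (n : Nat) (hpos : ∀ j < n, 0 ≤ aR A j) :
    ∀ m, m ≤ n →
      ((List.range m).foldl (updD A (n : Int)) (List.replicate (n+1) 0)).length = n+1 ∧
      ∀ p, p ≤ n → ((List.range m).foldl (updD A (n : Int)) (List.replicate (n+1) 0)).getD p 0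
          = ∑ j ∈ Finset.range m, gF A (n : Int) j p := by
  intro m
  induction m with
  | zero =>
    intro _
    refine ⟨by simp, ?_⟩
    intro p _
    simp only [List.range_zero, List.foldl_nil, Finset.range_zero, Finset.sum_empty,
      pvGetD_replicate]
  | succ m ih =>
    intro hm1
    have hm : m ≤ n := by omega
    obtain ⟨ihl, ihv⟩ := ih hm
    rw [List.range_succ, List.foldl_append]
    simp only [List.foldl_cons, List.foldl_nil]
    set D := (List.range m).foldl (updD A (n : Int)) (List.replicate (n+1) 0) with hDdef
    have ha : 0 ≤ aR A m := hpos m (by omega)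
    have hlo0 : 0 ≤ loF A m := le_max_right _ _
    have hlom : loF A m ≤ (m : Int) := by unfold loF; omega
    have hhil : ((m : Int)) < hiF A (n : Int) m := by unfold hiF; omega
    have hhin : hiF A (n : Int) m ≤ (n : Int) := min_le_right _ _
    constructor
    · simp only [updD]
      rw [List.length_set, List.length_set, ihl]
    · intro p hp
      rw [Finset.sum_range_succ, ← ihv p hp]
      simp only [updD]
      have e1 : (loF A m = (p : Int)) ↔ p = (loF A m).toNat := by omega
      have e2 : (hiF A (n : Int) m = (p : Int)) ↔ p = (hiF A (n : Int) m).toNat := by omega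
      simp only [gF, e1, e2]
      set l := (loF A m).toNat with hldef
      set h := (hiF A (n : Int) m).toNat with hhdef
      have hlD : l < D.length := by omega
      have hhD : h < D.length := by omega
      have hlh : l ≠ h := by omega
      have hC1h : (D.set l (D.getD l 0 + 1)).getD h 0 = D.getD h 0 := by
        rw [pvGetD_set, if_neg (by tauto)]
      by_cases hph : p = h
      · subst hph
        rw [pvGetD_set, if_pos ⟨rfl, by rw [List.length_set]; exact hhD⟩, hC1h]
        rw [if_neg (by omega), if_pos rfl]
        ring
      · rw [pvGetD_set, if_neg (by tauto), pvGetD_set]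
        by_cases hpl : p = l
        · subst hpl
          rw [if_pos ⟨rfl, hlD⟩, if_pos rfl, if_neg hph]
          ring
        · rw [if_neg (by tauto), if_neg hpl, if_neg hph]
          ring

-- ---- phase 2: the prefix sums ----

theorem phase2 (D : List Int) (n : Nat) (hD : D.length = n+1) :
    ∀ m, m ≤ n - 1 →
      ((List.range m).foldl updP D).length = n+1 ∧
      (∀ p, p ≤ m → ((List.range m).foldl updP D).getD p 0
          = ∑ q ∈ Finset.range (p+1), D.getD q 0) ∧
      (∀ p, m < p → p ≤ n → ((List.range m).foldl updP D).getD p 0 = D.getD p 0) := by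
  intro m
  induction m with
  | zero =>
    intro _
    refine ⟨hD, ?_, fun p _ _ => rfl⟩
    intro p hp
    have hp0 : p = 0 := by omega
    subst hp0
    simp only [List.range_zero, List.foldl_nil, zero_add, Finset.sum_range_one]
  | succ m ih =>
    intro hm1
    have hm : m ≤ n - 1 := by omega
    obtain ⟨ihl, ihv, ihu⟩ := ih hm
    rw [List.range_succ, List.foldl_append]
    simp only [List.foldl_cons, List.foldl_nil]
    set P := (List.range m).foldl updP D with hPdef
    have hmn : m + 1 ≤ n := by omega
    have hP1 : P.getD (m+1) 0 = D.getD (m+1) 0 := ihu (m+1) (by omega) (by omega)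
    have hPm : P.getD m 0 = ∑ q ∈ Finset.range (m+1), D.getD q 0 := ihv m le_rfl
    refine ⟨?_, ?_, ?_⟩
    · simp only [updP]
      rw [List.length_set, ihl]
    · intro p hp
      simp only [updP]
      rw [pvGetD_set]
      by_cases hpm : p = m + 1
      · subst hpm
        rw [if_pos ⟨rfl, by omega⟩, hP1, hPm,
          Finset.sum_range_succ (fun q => D.getD q 0) (m+1)]
        ring
      · rw [if_neg (by simp [hpm])]
        exact ihv p (by omega)
    · intro p hp hpn
      simp only [updP]
      rw [pvGetD_set]
      rw [if_neg (by omega)]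
      exact ihu p (by omega) hpn

-- ---- the prefix-summed difference array is the direct count ----

theorem sum_dval_eq_cnt (A : List Int) (n : Nat) (hpos : ∀ j < n, 0 ≤ aR A j)
    (i : Nat) (hi : i < n) :
    ∑ q ∈ Finset.range (i+1), ∑ j ∈ Finset.range n, gF A (n : Int) j q = cntF A n i := by
  rw [Finset.sum_comm]
  unfold cntF
  apply Finset.sum_congr rfl
  intro j hj
  have hjn := Finset.mem_range.mp hj
  have ha := hpos j hjn
  unfold gF
  rw [Finset.sum_sub_distrib]
  rw [ind_sum, ind_sum]
  have h1 : 0 ≤ loF A j := le_max_right _ _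
  have h2 : 0 ≤ hiF A (n : Int) j := by unfold hiF; omega
  have habs : (|(i : Int) - (j : Int)| ≤ aR A j)
      ↔ ((j : Int) - aR A j ≤ (i : Int) ∧ (i : Int) ≤ (j : Int) + aR A j) := by
    rw [abs_le]; omega
  have hcast : ((i+1 : Nat) : Int) = (i : Int) + 1 := by push_cast; ring
  rw [hcast]
  simp only [habs]
  unfold loF hiF at *
  split_ifs <;> omega

theorem cntF_nonneg (A : List Int) (n i : Nat) : 0 ≤ cntF A n i := by
  unfold cntF
  apply Finset.sum_nonneg
  intro j _
  split_ifs <;> omega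

-- ---- characterization of port A's final C ----

theorem Cfin_getD (A : List Int) (n : Nat) (hn : 1 ≤ n) (hpos : ∀ j < n, 0 ≤ aR A j)
    (p : Nat) (hp : p < n) :
    ((List.range (n-1)).foldl updP
        ((List.range n).foldl (updD A (n : Int)) (List.replicate (n+1) 0))).getD p 0
      = cntF A n p := by
  obtain ⟨hlen1, hval1⟩ := phase1 A n hpos n le_rfl
  obtain ⟨_, hval2, _⟩ := phase2 _ n hlen1 (n-1) le_rfl
  rw [hval2 p (by omega)]
  rw [Finset.sum_congr rfl (fun q hq => hval1 q (by
    have := Finset.mem_range.mp hq; omega))]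
  exact sum_dval_eq_cnt A n hpos p hp

-- ---- the final update fold ----

theorem setfoldN (A : List Int) (v : Nat → Int) (m : Nat) :
    ((List.range m).foldl (fun Aa k => Aa.set k (v k)) A).length = A.length ∧
    ∀ p : Nat, ((List.range m).foldl (fun Aa k => Aa.set k (v k)) A).getD p 0
        = if p < m ∧ p < A.length then v p else A.getD p 0 := by
  induction m with
  | zero =>
    refine ⟨rfl, ?_⟩
    intro p
    simp only [List.range_zero, List.foldl_nil]
    rw [if_neg (by omega)]
  | succ m ih =>
    obtain ⟨ihl, ihv⟩ := ih
    rw [List.range_succ, List.foldl_append]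
    simp only [List.foldl_cons, List.foldl_nil]
    refine ⟨by rw [List.length_set, ihl], ?_⟩
    intro p
    rw [pvGetD_set, ihl, ihv p]
    by_cases hpm : p = m
    · subst hpm
      by_cases hl : p < A.length
      · rw [if_pos ⟨rfl, hl⟩, if_pos ⟨by omega, hl⟩]
      · rw [if_neg (by omega), if_neg (by omega), if_neg (by omega)]
    · rw [if_neg (by simp [hpm])]
      by_cases h2 : p < m ∧ p < A.length
      · rw [if_pos h2, if_pos ⟨by omega, h2.2⟩]
      · rw [if_neg h2, if_neg (by omega)]

-- ---- both step functions compute the same model step ----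

theorem stepA_model (A : List Int) (n : Nat) (hn : 1 ≤ n) (hpos : ∀ j < n, 0 ≤ aR A j) :
    solveStepA (n : Int) A =
      (if cntF A n 0 = (n : Int) ∨ cntF A n (n-1) = (n : Int)
       then ((List.range n).foldl (fun Aa k => Aa.set k (n : Int)) A, true)
       else ((List.range n).foldl (fun Aa k => Aa.set k (cntF A n k)) A, false)) := by
  simp only [solveStepA]
  have hC0 : (PySem.List.pyRange 0 ((n : Int)+1) 1).map (fun _ => (0:Int))
      = List.replicate (n+1) 0 := by
    rw [List.map_const']
    rw [PySem.List.length_pyRange_one]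
    congr 1
  rw [hC0]
  rw [pyfoldA n (stepABody A (n:Int)) (updD A (n:Int)) _ (fun C k hk => bridge1 A n hpos C k hk)]
  rw [pyfoldP n stepAPrefix updP _ (fun C k _ => bridge2 C k)]
  have hc0 : PySem.List.pyGetD ((List.range (n-1)).foldl updP
      ((List.range n).foldl (updD A (n : Int)) (List.replicate (n+1) 0))) 0 0 = cntF A n 0 := by
    rw [PySem.List.pyGetD_zero]
    exact Cfin_getD A n hn hpos 0 (by omega)
  have hc1 : PySem.List.pyGetD ((List.range (n-1)).foldl updP
      ((List.range n).foldl (updD A (n : Int)) (List.replicate (n+1) 0))) ((n : Int) - 1) 0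
      = cntF A n (n-1) := by
    have h : ((n : Int) - 1) = ((n-1 : Nat) : Int) := by omega
    rw [h, PySem.List.pyGetD_natCast]
    exact Cfin_getD A n hn hpos (n-1) (by omega)
  rw [hc0, hc1]
  by_cases h : cntF A n 0 = (n : Int) ∨ cntF A n (n-1) = (n : Int)
  · rw [if_pos h, if_pos h]
    rw [pyfoldA n (fun Aa i => PySem.List.pySetD Aa i (n : Int))
        (fun Aa k => Aa.set k (n : Int)) A
        (fun Aa k _ => by simp [PySem.List.pySetD_natCast])]
  · rw [if_neg h, if_neg h]
    rw [pyfoldA n _ (fun Aa k => Aa.set k (cntF A n k)) A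
        (fun Aa k hk => by
          have hv : PySem.List.pyGetD ((List.range (n-1)).foldl updP
              ((List.range n).foldl (updD A (n : Int)) (List.replicate (n+1) 0))) ((k : Nat) : Int) 0
              = cntF A n k := by
            rw [PySem.List.pyGetD_natCast]
            exact Cfin_getD A n hn hpos k hk
          simp [PySem.List.pySetD_natCast, hv])]

theorem cntB_eq (A : List Int) (n k : Nat) :
    solveCntB A (n : Int) ((k : Nat) : Int) = cntF A n k := by
  unfold solveCntB
  rw [pyfoldA n _ (fun acc (j : Nat) => if |((k : Nat) : Int) - (j : Int)| ≤ aR A j then acc + 1 else acc) 0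
      (fun acc j _ => by simp [PySem.List.pyGetD_natCast, aR])]
  rw [foldl_if_count (fun j => |((k : Nat) : Int) - (j : Int)| ≤ aR A j) n 0]
  rw [zero_add]
  rfl

theorem stepB_model (A : List Int) (n : Nat) (hn : 1 ≤ n) :
    solveStepB (n : Int) A =
      (if cntF A n 0 = (n : Int) ∨ cntF A n (n-1) = (n : Int)
       then ((List.range n).foldl (fun Aa k => Aa.set k (n : Int)) A, true)
       else ((List.range n).foldl (fun Aa k => Aa.set k (cntF A n k)) A, false)) := by
  simp only [solveStepB]
  have hCB : ∀ k : Nat, k < n →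
      PySem.List.pyGetD ((PySem.List.pyRange 0 (n : Int) 1).map (fun i => solveCntB A (n : Int) i))
        ((k : Nat) : Int) 0 = cntF A n k := by
    intro k hk
    rw [PySem.List.pyGetD_map_pyRange_of_nonneg _ _ _ _ (by omega) (by omega)]
    exact cntB_eq A n k
  have hc0 : PySem.List.pyGetD ((PySem.List.pyRange 0 (n : Int) 1).map (fun i => solveCntB A (n : Int) i)) 0 0
      = cntF A n 0 := by
    have h := hCB 0 (by omega)
    simpa using h
  have hc1 : PySem.List.pyGetD ((PySem.List.pyRange 0 (n : Int) 1).map (fun i => solveCntB A (n : Int) i)) ((n : Int) - 1) 0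
      = cntF A n (n-1) := by
    have h : ((n : Int) - 1) = ((n-1 : Nat) : Int) := by omega
    rw [h]
    exact hCB (n-1) (by omega)
  rw [hc0, hc1]
  by_cases h : cntF A n 0 = (n : Int) ∨ cntF A n (n-1) = (n : Int)
  · rw [if_pos (Or.inr h), if_pos h]
    rw [pyfoldA n (fun Aa i => PySem.List.pySetD Aa i (n : Int))
        (fun Aa k => Aa.set k (n : Int)) A
        (fun Aa k _ => by simp [PySem.List.pySetD_natCast])]
  · rw [if_neg (by
        rintro (h0 | hor)
        · omega
        · exact h hor), if_neg h]
    rw [pyfoldA n _ (fun Aa k => Aa.set k (cntF A n k)) A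
        (fun Aa k hk => by
          have hv := hCB k hk
          simp [PySem.List.pySetD_natCast, hv])]

theorem step_eq (A : List Int) (n : Nat) (hn : 1 ≤ n) (hinv : invA A n) :
    solveStepA (n : Int) A = solveStepB (n : Int) A := by
  rw [stepA_model A n hn hinv.2, stepB_model A n hn]

theorem step_inv (A : List Int) (n : Nat) (hn : 1 ≤ n) (hinv : invA A n) :
    invA (solveStepA (n : Int) A).1 n := by
  obtain ⟨hlenA, hposA⟩ := hinv
  rw [stepA_model A n hn hposA]
  by_cases h : cntF A n 0 = (n : Int) ∨ cntF A n (n-1) = (n : Int)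
  · rw [if_pos h]
    obtain ⟨hl, hv⟩ := setfoldN A (fun _ => (n : Int)) n
    refine ⟨by simp only [hl]; exact hlenA, ?_⟩
    intro j hj
    show (0:Int) ≤ _
    unfold aR
    rw [hv j, if_pos ⟨hj, by omega⟩]
    omega
  · rw [if_neg h]
    obtain ⟨hl, hv⟩ := setfoldN A (fun k => cntF A n k) n
    refine ⟨by simp only [hl]; exact hlenA, ?_⟩
    intro j hj
    show (0:Int) ≤ _
    unfold aR
    rw [hv j, if_pos ⟨hj, by omega⟩]
    exact cntF_nonneg A n j

theorem loop_eq (n : Nat) (hn : 1 ≤ n) : ∀ (L : List Int) (st : List Int × Bool), invA st.1 n →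
    L.foldl (fun s _ => if s.2 then s else solveStepA (n : Int) s.1) st
      = L.foldl (fun s _ => if s.2 then s else solveStepB (n : Int) s.1) st := by
  intro L
  induction L with
  | nil => intro st _; rfl
  | cons x L ih =>
    intro st hinv
    simp only [List.foldl_cons]
    by_cases hb : st.2
    · rw [if_pos hb, if_pos hb]
      exact ih st hinv
    · rw [if_neg hb, if_neg hb, ← step_eq st.1 n hn hinv]
      exact ih _ (step_inv st.1 n hn hinv)

-- ---- the N = 0 corner: A breaks immediately, B's loop is a no-op ----

theorem stepA_zero (A : List Int) : solveStepA 0 A = (A, true) := by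
  simp only [solveStepA]
  have h01 : PySem.List.pyRange 0 ((0:Int)+1) 1 = [0] := PySem.List.pyRange_one_singleton 0
  rw [h01]
  rw [PySem.List.pyRange_one_eq_nil (by norm_num : (0:Int) ≤ 0),
      PySem.List.pyRange_one_eq_nil (by norm_num : (0:Int) ≤ 1)]
  simp [PySem.List.pyGetD_zero_cons]

theorem stepB_zero (A : List Int) : solveStepB 0 A = (A, true) := by
  simp only [solveStepB]
  rw [PySem.List.pyRange_one_eq_nil (by norm_num : (0:Int) ≤ 0)]
  simp

theorem foldA_zero (A : List Int) : ∀ (L : List Int) (st : List Int × Bool), st.1 = A →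
    (L.foldl (fun s _ => if s.2 then s else solveStepA 0 s.1) st).1 = A := by
  intro L
  induction L with
  | nil => intro st h; exact h
  | cons x L ih =>
    intro st h
    simp only [List.foldl_cons]
    by_cases hb : st.2
    · rw [if_pos hb]; exact ih st h
    · rw [if_neg hb, h, stepA_zero]
      exact ih _ rfl

theorem foldB_zero (A : List Int) : ∀ (L : List Int) (st : List Int × Bool), st.1 = A →
    (L.foldl (fun s _ => if s.2 then s else solveStepB 0 s.1) st).1 = A := by
  intro L
  induction L with
  | nil => intro st h; exact h
  | cons x L ih =>
    intro st h
    simp only [List.foldl_cons]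
    by_cases hb : st.2
    · rw [if_pos hb]; exact ih st h
    · rw [if_neg hb, h, stepB_zero]
      exact ih _ rfl

-- ===== VERDICT (by name: the statement is the Claim_ definition above) =====
theorem solve_spec : Claim_equal_solve := by
  unfold Claim_equal_solve
  intro A N K _ hpre
  unfold Spec_solve solve solve_alt
  rcases hpre with hK | ⟨hN, hlen, hpos⟩
  · rw [PySem.List.pyRange_one_eq_nil hK]
    rfl
  · have hNn : N = (N.toNat : Int) := by omega
    rw [hNn]
    set n := N.toNat with hndef
    have hpos' : ∀ j < n, 0 ≤ aR A j := by
      intro j hj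
      have hjlen : j < A.length := by omega
      have hget : aR A j = A[j] := by
        unfold aR
        exact List.getD_eq_getElem A 0 hjlen
      rw [hget]
      have htake : A[j] = (A.take n)[j]'(by
        rw [List.length_take]; omega) := (List.getElem_take ..).symm
      have hmem : A[j] ∈ A.take n := by
        rw [htake]; exact List.getElem_mem _
      have := List.all_eq_true.mp hpos _ hmem
      exact of_decide_eq_true this
    rcases Nat.eq_zero_or_pos n with h0 | h1
    · rw [h0]
      simp only [Nat.cast_zero]
      rw [foldA_zero A _ _ rfl, foldB_zero A _ _ rfl]
    · rw [loop_eq n h1 (PySem.List.pyRange 0 K 1) (A, false)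
        ⟨(show n ≤ A.length by omega), hpos'⟩]
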